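-- pv_equiv track=rewrite | github.com/daniel10027/cursus | Javascript/tasks/caesarBoxCipherEncoding2.py | caesarBoxCipherEncoding2
-- ===== SOURCE A (Python) =====
-- def caesarBoxCipherEncoding2(message):
--     r = 0
--     for i in range(2, len(message)):
--         if len(message) % i != 0:
--             continue
--         if encode(encode(message, i), i) == message:
--             r +=1
--
--     return r
--
-- def encode(msg, n):
--     r = ''
--     for i in range(n):
--         for c in range(i, len(msg), n):
--             r += msg[c]
--     return r
-- ===== SOURCE B (Python) =====
-- def caesarBoxCipherEncoding2(message):
--     L = len(message)
--     r = 0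
--     for i in range(2, L):
--         if L % i != 0:
--             continue
--         # encode(.,i) sends index p to index (p*i) % (L-1) (fixing L-1), so a
--         # double encode returns the message iff every character equals the one
--         # at index (p*i*i) % (L-1): a pure modular-arithmetic check, no strings
--         # or index lists are built.
--         if all(message[(p * i * i) % (L - 1)] == message[p] for p in range(L - 1)):
--             r += 1
--     return r
-- ===== Notes on version B (the rewrite author's own statement) =====
-- stated objective: alternative
-- what changed: B replaces the double string-encoding by a number-theoretic characterisation: the Caesar-box encode with i columns moves index p to (p*i) mod (L-1) (fixing L-1), so B just checks message[(p*i*i) % (L-1)] == message[p] for every p, never building encoded strings; it also short-circuits on the first mismatch.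
import Mathlib
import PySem

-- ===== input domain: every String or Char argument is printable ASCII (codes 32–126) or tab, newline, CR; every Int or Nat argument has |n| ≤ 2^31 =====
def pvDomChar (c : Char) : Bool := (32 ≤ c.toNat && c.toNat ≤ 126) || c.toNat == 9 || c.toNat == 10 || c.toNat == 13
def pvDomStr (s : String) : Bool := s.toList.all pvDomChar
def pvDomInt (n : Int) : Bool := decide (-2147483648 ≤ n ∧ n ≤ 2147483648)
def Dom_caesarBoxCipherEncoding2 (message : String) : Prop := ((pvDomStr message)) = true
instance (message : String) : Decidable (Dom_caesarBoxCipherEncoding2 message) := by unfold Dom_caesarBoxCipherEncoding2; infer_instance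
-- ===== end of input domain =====

-- B replaces the double string encoding by the number-theoretic fact that encode(·,i)
-- sends index p to (p*i) mod (L-1) (fixing L-1), so it checks
-- message[(p*i*i) % (L-1)] == message[p] directly (objective: alternative).

-- ===== PORT A =====
-- encode(msg, n): 'r += msg[c]' — PySem.List.pyGet? msg c is some of msg[c]
-- (none would be Python's IndexError; unreachable here since 0 ≤ c < len(msg)),
-- and Option.toList appends exactly that one character.
def pvEncode (msg : List Char) (n : Int) : List Char :=
  (PySem.List.pyRange 0 n 1).foldl (fun r i =>
    (PySem.List.pyRange i (msg.length : Int) n).foldl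
      (fun r c => r ++ (PySem.List.pyGet? msg c).toList) r) []

def caesarBoxCipherEncoding2 (message : String) : Int :=
  let msg := message.toList
  (PySem.List.pyRange 2 (msg.length : Int) 1).foldl (fun r i =>
    if PySem.Int.mod (msg.length : Int) i ≠ 0 then r
    else if pvEncode (pvEncode msg i) i = msg then r + 1 else r) 0

-- ===== PORT B =====
def caesarBoxCipherEncoding2_alt (message : String) : Int :=
  let msg := message.toList
  let L : Int := msg.length
  (PySem.List.pyRange 2 L 1).foldl (fun r i =>
    if PySem.Int.mod L i ≠ 0 then r
    else if (PySem.List.pyRange 0 (L - 1) 1).all (fun p =>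
        PySem.List.pyGet? msg (PySem.Int.mod (p * i * i) (L - 1)) == PySem.List.pyGet? msg p)
      then r + 1 else r) 0

-- ===== PRECONDITION & SPEC =====
def Spec_caesarBoxCipherEncoding2 (message : String) (out : Int) : Prop := out = caesarBoxCipherEncoding2_alt message
instance (message : String) (out : Int) : Decidable (Spec_caesarBoxCipherEncoding2 message out) := by unfold Spec_caesarBoxCipherEncoding2; infer_instance

-- ===== CLAIM (what is proved, stated in full; the proofs are below) =====
def Claim_equal_caesarBoxCipherEncoding2 : Prop := ∀ (message : String), Dom_caesarBoxCipherEncoding2 message → Spec_caesarBoxCipherEncoding2 message (caesarBoxCipherEncoding2 message)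

-- ===== LEMMAS AND PROOFS =====

-- the index permutation underlying encode(·, i): block col is range(col, L, i)
def pvPerm (i L : Int) : List Int :=
  (PySem.List.pyRange 0 i 1).flatMap (fun col => PySem.List.pyRange col L i)

lemma pvEncode_eq (msg : List Char) (i : Int) :
    pvEncode msg i
      = (pvPerm i (msg.length : Int)).flatMap
          (fun c => (PySem.List.pyGet? msg c).toList) := by
  unfold pvEncode pvPerm
  simp only [PySem.List.foldl_append_eq_flatMap]
  rw [List.flatMap_assoc, List.nil_append]

lemma range_mul_flatMap (a m : Nat) :
    List.range (a * m)
      = (List.range a).flatMap (fun col => (List.range m).map (fun k => col * m + k)) := by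
  induction a with
  | zero => simp
  | succ a ih =>
    rw [Nat.succ_mul, List.range_add, ih, List.range_succ, List.flatMap_append]
    simp

lemma col_block (a m : Nat) (col : Nat) (ha : 0 < a) (hm : 0 < m) (hcol : col < a) :
    PySem.List.pyRange (col : Int) ((a * m : Nat) : Int) (a : Int)
      = (List.range m).map (fun k : Nat => ((col : Int) + (a : Int) * (k : Int))) := by
  have haZ : (0:Int) < (a:Int) := by exact_mod_cast ha
  have hcZ : (col:Int) < (a:Int) := by exact_mod_cast hcol
  have hmZ : (0:Int) < (m:Int) := by exact_mod_cast hm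
  have hlt : (col:Int) < ((a*m:Nat):Int) := by
    push_cast; nlinarith
  rw [PySem.List.pyRange_of_pos _ _ haZ, if_pos hlt]
  have e : ((a*m : Nat):Int) - col + a - 1 = ((a:Int) - 1 - col) + m * a := by
    push_cast; ring
  rw [e, Int.add_mul_ediv_right _ _ (by omega : (a:Int) ≠ 0),
      Int.ediv_eq_zero_of_lt (by omega) (by omega), zero_add, Int.toNat_natCast]

lemma pvPerm_eq_map (a m : Nat) (ha : 0 < a) (hm : 0 < m) :
    pvPerm (a : Int) ((a * m : Nat) : Int)
      = (List.range (a * m)).map (fun p => ((p / m + p % m * a : Nat) : Int)) := by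
  have haZ : (0:Int) < (a:Int) := by exact_mod_cast ha
  unfold pvPerm
  rw [PySem.List.pyRange_one]
  simp only [Int.sub_zero, Int.toNat_natCast, List.flatMap_map, Int.zero_add]
  rw [range_mul_flatMap a m, List.map_flatMap]
  refine List.flatMap_congr ?_
  intro col hcol
  rw [List.mem_range] at hcol
  rw [List.map_map, col_block a m col ha hm hcol]
  refine List.map_congr_left ?_
  intro k hk
  rw [List.mem_range] at hk
  have h1 : (col * m + k) / m = col := by
    rw [Nat.mul_comm col m, Nat.mul_add_div hm, Nat.div_eq_of_lt hk, Nat.add_zero]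
  have h2 : (col * m + k) % m = k := by
    rw [Nat.mul_comm col m, Nat.mul_add_mod, Nat.mod_eq_of_lt hk]
  simp only [Function.comp_apply, h1, h2]
  push_cast; ring

-- encode(·, i) moves index p to (p*i) mod (L-1), fixing L-1
lemma f_formula (a m p : Nat) (ha : 2 ≤ a) (hm : 2 ≤ m) (hp : p < a * m) :
    p / m + p % m * a = if p = a * m - 1 then a * m - 1 else p * a % (a * m - 1) := by
  have hm0 : 0 < m := by omega
  have h4 : 4 ≤ a * m := Nat.mul_le_mul ha hm
  have h1 : 1 ≤ a * m := le_trans (by norm_num : (1:ℕ) ≤ 4) h4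
  have hq : p / m < a := Nat.div_lt_of_lt_mul (by rwa [Nat.mul_comm] at hp)
  have hr : p % m < m := Nat.mod_lt _ hm0
  have hpe : m * (p / m) + p % m = p := Nat.div_add_mod p m
  by_cases hlast : p = a * m - 1
  · rw [if_pos hlast]
    have hsplit : p = m * (a - 1) + (m - 1) := by
      rw [hlast]
      zify [h1, (by omega : 1 ≤ a), (by omega : 1 ≤ m)]
      ring
    have hd : p / m = a - 1 := by
      rw [hsplit, Nat.mul_add_div hm0, Nat.div_eq_of_lt (by omega), Nat.add_zero]
    have hmod : p % m = m - 1 := by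
      rw [hsplit, Nat.mul_add_mod, Nat.mod_eq_of_lt (by omega)]
    rw [hd, hmod]
    zify [h1, (by omega : 1 ≤ a), (by omega : 1 ≤ m)]
    ring
  · rw [if_neg hlast]
    generalize hQ : p / m = q at hq hpe ⊢
    generalize hR : p % m = r at hr hpe ⊢
    have hkey : p * a = q * (a * m - 1) + (q + r * a) := by
      zify [h1]
      have hpeZ : (m : Int) * (q : Int) + (r : Int) = (p : Int) := by exact_mod_cast hpe
      linear_combination (a : Int) * hpeZ.symm
    have hstrict : q + r * a < a * m - 1 := by
      rcases Nat.lt_or_ge r (m - 1) with h | h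
      · have hb1 : q + r * a ≤ (a - 1) + (m - 2) * a := by
          have h2 : r * a ≤ (m - 2) * a := Nat.mul_le_mul_right a (by omega)
          omega
        have hb2 : (a - 1) + (m - 2) * a < a * m - 1 := by
          zify [h1, (by omega : 1 ≤ a), (by omega : 2 ≤ m)]
          nlinarith
        omega
      · have hrm : r = m - 1 := by omega
        have hqne : q < a - 1 := by
          rcases Nat.lt_or_ge q (a - 1) with h' | h'
          · exact h'
          · exfalso
            have hqa : q = a - 1 := by omega
            apply hlast
            rw [← hpe, hqa, hrm]
            zify [h1, (by omega : 1 ≤ a), (by omega : 1 ≤ m)]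
            ring
        have h2 : r * a = (m - 1) * a := by rw [hrm]
        have hb1 : q + r * a ≤ (a - 2) + (m - 1) * a := by omega
        have hb2 : (a - 2) + (m - 1) * a < a * m - 1 := by
          zify [h1, (by omega : 2 ≤ a), (by omega : 1 ≤ m)]
          nlinarith
        omega
    rw [hkey, Nat.mul_add_mod', Nat.mod_eq_of_lt hstrict]

lemma flatMap_get_eq_map (msg : List Char) :
    ∀ (P : List Int), (∀ c ∈ P, 0 ≤ c ∧ c < (msg.length : Int)) →
      P.flatMap (fun c => (PySem.List.pyGet? msg c).toList)
        = P.map (fun c => msg.getD c.toNat 'x') := by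
  intro P
  induction P with
  | nil => intro _; rfl
  | cons c P ih =>
    intro h
    have hc := h c List.mem_cons_self
    simp only [List.flatMap_cons, List.map_cons]
    rw [PySem.List.pyGet?_eq_some_getElem _ hc.1 hc.2,
        ih (fun d hd => h d (List.mem_cons_of_mem _ hd)),
        List.getD_eq_getElem _ _ (show c.toNat < msg.length by omega)]
    rfl

-- "double encode returns the message" pointwise, through the permutation's entries
lemma double_eq_iff (msg : List Char) (i : Int)
    (hPb : ∀ c ∈ pvPerm i (msg.length : Int), 0 ≤ c ∧ c < (msg.length : Int))
    (hPlenN : (pvPerm i (msg.length : Int)).length = msg.length) :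
    (pvEncode (pvEncode msg i) i = msg) ↔
      ∀ k : Nat, k < msg.length →
        msg.getD ((pvPerm i (msg.length : Int)).getD
          ((pvPerm i (msg.length : Int)).getD k 0).toNat 0).toNat 'x' = msg.getD k 'x' := by
  set P : List Int := pvPerm i ((msg.length : Int)) with hPdef
  have hE1 : pvEncode msg i = P.map (fun c => msg.getD c.toNat 'x') := by
    rw [pvEncode_eq, flatMap_get_eq_map msg _ hPb]
  have hE1len : ((pvEncode msg i).length : Int) = (msg.length : Int) := by
    rw [hE1, List.length_map, hPlenN]
  have hE2 : pvEncode (pvEncode msg i) i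
      = P.map (fun c => (pvEncode msg i).getD c.toNat 'x') := by
    rw [pvEncode_eq, hE1len]
    exact flatMap_get_eq_map _ _ (fun c hc => by rw [hE1len]; exact hPb c hc)
  have hPentry : ∀ k : Nat, k < msg.length →
      0 ≤ P.getD k 0 ∧ P.getD k 0 < (msg.length : Int) := by
    intro k hk
    have hk' : k < P.length := by omega
    rw [List.getD_eq_getElem _ _ hk']
    exact hPb _ (List.getElem_mem hk')
  have hg : ∀ c : Int, 0 ≤ c → c < (msg.length : Int) →
      (pvEncode msg i).getD c.toNat 'x' = msg.getD (P.getD c.toNat 0).toNat 'x' := by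
    intro c h0 h1
    rw [hE1]
    have hc : c.toNat < P.length := by omega
    rw [List.getD_eq_getElem _ _ (by simpa using hc), List.getElem_map,
        List.getD_eq_getElem _ _ hc]
  have hcomp : ∀ k : Nat, k < P.length →
      (P.map (fun c => (pvEncode msg i).getD c.toNat 'x')).getD k 'x'
        = msg.getD (P.getD (P.getD k 0).toNat 0).toNat 'x' := by
    intro k hk
    rw [List.getD_eq_getElem _ _ (by simpa using hk), List.getElem_map]
    have hb := hPb _ (List.getElem_mem hk)
    rw [hg _ hb.1 hb.2, List.getD_eq_getElem _ _ hk]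
  constructor
  · intro h k hk
    rw [hE2] at h
    have hpt := congrArg (fun l => List.getD l k 'x') h
    simp only at hpt
    rw [hcomp k (by omega)] at hpt
    exact hpt
  · intro h
    rw [hE2]
    apply List.ext_getElem (by simp [hPlenN])
    intro k h1 h2
    have hc := hcomp k (by omega)
    rw [List.getD_eq_getElem _ _ h1] at hc
    rw [hc, h k (by omega), List.getD_eq_getElem _ _ h2]

-- the bridge: A's double-encode test equals B's modular-index test
lemma key_iff (msg : List Char) (i : Int) (h2 : 2 ≤ i) (hiL : i < (msg.length : Int))
    (hdvd : i ∣ (msg.length : Int)) :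
    (pvEncode (pvEncode msg i) i = msg)
      ↔ ((PySem.List.pyRange 0 ((msg.length : Int) - 1) 1).all (fun p =>
            PySem.List.pyGet? msg (PySem.Int.mod (p * i * i) ((msg.length : Int) - 1))
              == PySem.List.pyGet? msg p) = true) := by
  -- Nat-level data
  set L : Nat := msg.length with hLdef
  have hiNN : (0:Int) ≤ i := by omega
  set a : Nat := i.toNat with hadef
  have hiA : i = (a : Int) := (Int.toNat_of_nonneg hiNN).symm
  have haL : a < L := by omega
  have ha2 : 2 ≤ a := by omega
  have hdvdN : a ∣ L := by
    rcases hdvd with ⟨c, hc⟩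
    exact Int.ofNat_dvd.mp (by rw [← hiA]; exact ⟨c, hc⟩)
  set m : Nat := L / a with hmdef
  have hLam : L = a * m := (Nat.mul_div_cancel' hdvdN).symm
  have hm2 : 2 ≤ m := by
    by_contra hmlt
    have hm1 : m ≤ 1 := by omega
    nlinarith
  have hm0 : 0 < m := by omega
  have ha0 : 0 < a := by omega
  set n : Nat := L - 1 with hndef
  have hn3 : 3 ≤ n := by
    have : 4 ≤ a * m := Nat.mul_le_mul ha2 hm2
    omega
  -- the permutation as an explicit map
  have hPmap : pvPerm i (L : Int)
      = (List.range L).map (fun p => ((p / m + p % m * a : Nat) : Int)) := by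
    rw [hiA]
    have := pvPerm_eq_map a m ha0 hm0
    rw [← hLam] at this
    exact this
  have hPlenN : (pvPerm i (L : Int)).length = L := by rw [hPmap]; simp
  -- entry formula: fN k
  have hfval : ∀ k : Nat, k < L →
      (pvPerm i (L : Int)).getD k 0
        = ((if k = n then n else k * a % n : Nat) : Int) := by
    intro k hk
    rw [hPmap, List.getD_eq_getElem _ _ (by simpa using hk), List.getElem_map,
        List.getElem_range]
    have := f_formula a m k ha2 hm2 (by omega)
    rw [← hLam] at this
    rw [this]
  have hfN_lt : ∀ k : Nat, k < L → (if k = n then n else k * a % n) < L := by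
    intro k hk
    split
    · omega
    · have : k * a % n < n := Nat.mod_lt _ (by omega)
      omega
  have hPb : ∀ c ∈ pvPerm i (L : Int), 0 ≤ c ∧ c < (L : Int) := by
    intro c hc
    rw [hPmap, List.mem_map] at hc
    obtain ⟨p, hp, rfl⟩ := hc
    rw [List.mem_range] at hp
    have := f_formula a m p ha2 hm2 (by omega)
    rw [← hLam] at this
    constructor
    · exact Int.natCast_nonneg _
    · exact_mod_cast (by rw [this]; exact hfN_lt p hp)
  have pyGet_nat : ∀ x : Nat, x < L → PySem.List.pyGet? msg ((x : Nat) : Int) = some (msg.getD x 'x') := by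
    intro x hx
    rw [PySem.List.pyGet?_eq_some_getElem _ (Int.natCast_nonneg _) (by exact_mod_cast hx)]
    congr 1
    simp [List.getD_eq_getElem?_getD, List.getElem?_eq_getElem hx]
  rw [double_eq_iff msg i hPb hPlenN]
  -- characterise both sides by the Nat condition  ∀ k < n, msg[k*a*a % n] = msg[k]
  have hmid : (∀ k : Nat, k < L →
        msg.getD ((pvPerm i (L : Int)).getD
          ((pvPerm i (L : Int)).getD k 0).toNat 0).toNat 'x' = msg.getD k 'x')
      ↔ (∀ k : Nat, k < n → msg.getD (k * a * a % n) 'x' = msg.getD k 'x') := by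
    constructor
    · intro h k hk
      have h1 := h k (by omega)
      rw [hfval k (by omega), if_neg (by omega)] at h1
      rw [Int.toNat_natCast] at h1
      have hlt : k * a % n < L := by
        have : k * a % n < n := Nat.mod_lt _ (by omega); omega
      rw [hfval _ hlt, if_neg (by
        have : k * a % n < n := Nat.mod_lt _ (by omega); omega)] at h1
      rw [Int.toNat_natCast, Nat.mod_mul_mod] at h1
      exact h1
    · intro h k hk
      by_cases hkn : k = n
      · subst hkn
        rw [hfval n (by omega), if_pos rfl, Int.toNat_natCast,
            hfval n (by omega), if_pos rfl, Int.toNat_natCast]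
      · have hkn' : k < n := by omega
        rw [hfval k (by omega), if_neg hkn, Int.toNat_natCast]
        have hlt : k * a % n < L := by
          have : k * a % n < n := Nat.mod_lt _ (by omega); omega
        rw [hfval _ hlt, if_neg (by
          have : k * a % n < n := Nat.mod_lt _ (by omega); omega),
          Int.toNat_natCast, Nat.mod_mul_mod]
        exact h k hkn'
  rw [hmid]
  -- B's check equals the same Nat condition
  have hL1 : (L : Int) - 1 = (n : Int) := by omega
  rw [hL1]
  constructor
  · intro h
    rw [List.all_eq_true]
    intro p hp
    rw [PySem.List.mem_pyRange_one] at hp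
    obtain ⟨hp0, hp1⟩ := hp
    set k : Nat := p.toNat with hkdef
    have hpk : p = (k : Int) := by omega
    have hkn : k < n := by omega
    have hidx : PySem.Int.mod (p * i * i) ((n : Nat) : Int)
        = ((k * a * a % n : Nat) : Int) := by
      rw [PySem.Int.mod_eq_emod_of_pos (by omega), hpk, hiA, Int.natCast_mod]
      push_cast
      ring_nf
    rw [hidx]
    have hlt : k * a * a % n < L := by
      have : k * a * a % n < n := Nat.mod_lt _ (by omega); omega
    rw [pyGet_nat _ hlt, hpk, pyGet_nat _ (by omega : k < L), beq_iff_eq, Option.some_inj]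
    exact h k hkn
  · intro h k hkn
    rw [List.all_eq_true] at h
    have hmem : ((k : Nat) : Int) ∈ PySem.List.pyRange 0 ((n : Nat) : Int) 1 := by
      rw [PySem.List.mem_pyRange_one]
      constructor
      · exact Int.natCast_nonneg _
      · exact_mod_cast hkn
    have hb := h _ hmem
    have hidx : PySem.Int.mod (((k : Nat) : Int) * i * i) ((n : Nat) : Int)
        = ((k * a * a % n : Nat) : Int) := by
      rw [PySem.Int.mod_eq_emod_of_pos (by omega), hiA, Int.natCast_mod]
      push_cast
      ring_nf
    rw [hidx] at hb
    have hlt : k * a * a % n < L := by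
      have : k * a * a % n < n := Nat.mod_lt _ (by omega); omega
    rw [pyGet_nat _ hlt, pyGet_nat _ (by omega : k < L), beq_iff_eq, Option.some_inj] at hb
    exact hb

-- ===== VERDICT (by name: the statement is the Claim_ definition above) =====
theorem caesarBoxCipherEncoding2_spec : Claim_equal_caesarBoxCipherEncoding2 := by
  intro message _
  unfold Spec_caesarBoxCipherEncoding2
  simp only [caesarBoxCipherEncoding2, caesarBoxCipherEncoding2_alt]
  refine PySem.List.foldl_congr_mem _ _ _ _ ?_
  intro acc x hx
  have hx2 := PySem.List.mem_pyRange_one.mp hx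
  by_cases hmod : PySem.Int.mod (message.toList.length : Int) x ≠ 0
  · rw [if_pos hmod, if_pos hmod]
  · rw [Decidable.not_not] at hmod
    have hdvd : x ∣ (message.toList.length : Int) :=
      (PySem.Int.mod_eq_zero_iff_dvd _ _).mp hmod
    have hne : ¬ ((0:Int) ≠ 0) := by omega
    rw [hmod, if_neg hne, if_neg hne,
        if_congr (key_iff message.toList x hx2.1 hx2.2 hdvd) rfl rfl]
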